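-- pv_equiv track=rewrite | github.com/S0NGMinHyuk/programmers-file | level 1/과일 장수.py | solution
-- ===== SOURCE A (Python) =====
-- def solution(k, m, score):
--     # 제일 최상품인 사과 순서로 m개씩 포장
--     score.sort(reverse=True)
--     box = [score[i:i+m] for i in range(0, len(score), m)]
--
--     # 박스의 사과 개수가 m개라면 price에 가격 추가
--     price = 0
--     for b in box:
--         if len(b) == m:
--             price += min(b) * len(b)
--
--     return price
-- ===== SOURCE B (Python) =====
-- def solution(k, m, score):
--     # Counting approach: tally each score once, walk the distinct scores in
--     # descending order as runs of equal values, and for each run compute by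
--     # arithmetic how many box-minimum positions (positions p with p % m == m-1,
--     # among the first n - n % m positions) fall inside that run.
--     if m < 1:
--         return 0  # no positive box size: no full box can be packed
--     counts = {}
--     for v in score:
--         counts[v] = counts.get(v, 0) + 1
--     n = len(score)
--     full = n - n % m          # number of scores that end up in full boxes
--     total = 0
--     start = 0                 # position (in descending order) where the run begins
--     for v in sorted(counts, reverse=True):
--         c = counts[v]
--         hi = min(start + c, full)
--         if hi > start:
--             total += v * (hi // m - start // m)
--         start += c
--     return m * total
-- ===== Notes on version B (the rewrite author's own statement) =====
-- stated objective: alternative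
-- what changed: B replaces A's sort-everything/build-boxes/min-each-box pipeline by a counting approach: it tallies each score in a dict, sorts only the distinct scores descending, and for each run of equal scores computes arithmetically (via floor division) how many box-minimum positions fall in that run, so no boxes are built and no per-box min scans run; it sorts only d distinct values instead of all n.
import Mathlib
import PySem

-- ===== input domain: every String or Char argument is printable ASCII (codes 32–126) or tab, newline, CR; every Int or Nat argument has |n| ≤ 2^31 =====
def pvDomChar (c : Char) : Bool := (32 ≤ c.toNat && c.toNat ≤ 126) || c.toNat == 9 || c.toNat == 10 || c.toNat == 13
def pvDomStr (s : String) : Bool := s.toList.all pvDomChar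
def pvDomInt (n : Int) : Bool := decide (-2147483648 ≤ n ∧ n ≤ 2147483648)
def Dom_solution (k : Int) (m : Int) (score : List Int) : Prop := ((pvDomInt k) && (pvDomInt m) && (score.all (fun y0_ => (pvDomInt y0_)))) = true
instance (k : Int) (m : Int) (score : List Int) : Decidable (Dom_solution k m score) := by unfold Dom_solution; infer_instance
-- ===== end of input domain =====

-- B replaces A's sort/chunk/min-per-box pipeline by a counter over the scores plus run
-- arithmetic over the sorted distinct values (objective: alternative algorithm; note A
-- sorts `score` in place while B does not mutate its argument — the equivalence proved
-- is about the return value only).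

-- ===== PORT A =====
def solution (k : Int) (m : Int) (score : List Int) : Int :=
  let s := PySem.List.sorted score (fun x => x) true
  let box := (PySem.List.pyRange 0 (s.length : Int) m).map
    (fun i => PySem.List.slice s (some i) (some (i + m)))
  box.foldl (fun price b =>
    if (b.length : Int) = m then
      -- Python's min(b) cannot hit an empty b here (the guard just checked len(b) == m and
      -- the loop only runs when m ≠ 0); `.getD 0` only makes the expression total.
      price + ((PySem.List.min? b (fun x => x)).getD 0) * (b.length : Int)
    else price) 0

-- ===== PORT B =====
def solution_alt (k : Int) (m : Int) (score : List Int) : Int :=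
  if m < 1 then 0
  else
    let counts := score.foldl
      (fun d v => PySem.Dict.insert d v (PySem.Dict.getD d v 0 + 1)) PySem.Dict.empty
    let n : Int := (score.length : Int)
    let full : Int := n - PySem.Int.mod n m
    let res := (PySem.List.sorted (PySem.Dict.keys counts) (fun x => x) true).foldl
      (fun (st : Int × Int) v =>
        let c : Int := PySem.Dict.getD counts v 0
        let hi : Int := min (st.2 + c) full
        (if hi > st.2 then
           st.1 + v * (PySem.Int.floordiv hi m - PySem.Int.floordiv st.2 m)
         else st.1,
         st.2 + c))
      (0, 0)
    m * res.1

-- ===== PRECONDITION & SPEC =====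
-- Pre_ excludes exactly m = 0, where A raises ValueError (range() with step 0).
def Pre_solution (k : Int) (m : Int) (score : List Int) : Prop := m ≠ 0
instance (k : Int) (m : Int) (score : List Int) : Decidable (Pre_solution k m score) := by
  unfold Pre_solution; infer_instance
def pvWitness_solution : Int × Int × List Int := (10, 3, [1, 2, 3, 1, 2, 3, 1])

def Spec_solution (k : Int) (m : Int) (score : List Int) (out : Int) : Prop := out = solution_alt k m score
instance (k : Int) (m : Int) (score : List Int) (out : Int) : Decidable (Spec_solution k m score out) := by unfold Spec_solution; infer_instance

-- ===== CLAIM (what is proved, stated in full; the proofs are below) =====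
def Claim_equal_solution : Prop := ∀ (k : Int) (m : Int) (score : List Int), Dom_solution k m score → Pre_solution k m score → Spec_solution k m score (solution k m score)
-- ===== LEMMAS AND PROOFS =====

-- proof-only: the sum of the elements at "box-minimum" positions p (counted from
-- absolute position p onwards): positions with (p+1) % m == 0 that lie before `full`
def pvStride (m full : Int) : Int → List Int → Int
  | _, [] => 0
  | p, x :: t => (if (p + 1) % m = 0 ∧ p < full then x else 0) + pvStride m full (p + 1) t

-- range(a, b, step) with a negative step and a ≤ b is empty
lemma pvNegNil (a b mI : Int) (hm : mI < 0) (hab : a ≤ b) :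
    PySem.List.pyRange a b mI = [] := by
  simp only [PySem.List.pyRange]
  rw [if_neg (by omega), if_neg (by omega), if_neg (by omega)]
  simp

-- range(a, b, step) with a positive step and b ≤ a is empty
lemma pvNil (a b mI : Int) (hm : 0 < mI) (hab : b ≤ a) :
    PySem.List.pyRange a b mI = [] := by
  rw [PySem.List.pyRange_of_pos _ _ hm, if_neg (by omega)]
  simp

-- cons decomposition of a positive-step range
lemma pvCons (a b mI : Int) (hm : 0 < mI) (hab : a < b) :
    PySem.List.pyRange a b mI = a :: PySem.List.pyRange (a + mI) b mI := by
  rw [PySem.List.pyRange_of_pos _ _ hm, PySem.List.pyRange_of_pos _ _ hm]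
  have h2 : (b - a + mI - 1) / mI = (b - a - 1) / mI + 1 := by
    have h1 : b - a + mI - 1 = (b - a - 1) + 1 * mI := by ring
    rw [h1, Int.add_mul_ediv_right _ _ (by omega)]
  have hq : 0 ≤ (b - a - 1) / mI := Int.ediv_nonneg (by omega) (by omega)
  rw [if_pos hab]
  have hC : ((b - a + mI - 1) / mI).toNat = ((b - a - 1) / mI).toNat + 1 := by omega
  rw [hC, List.range_succ_eq_map, List.map_cons, List.map_map]
  have htail : (if a + mI < b then ((b - (a + mI) + mI - 1) / mI).toNat else 0)
      = ((b - a - 1) / mI).toNat := by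
    by_cases h : a + mI < b
    · rw [if_pos h]; congr 1; ring_nf
    · rw [if_neg h]
      have : (b - a - 1) / mI = 0 := Int.ediv_eq_zero_of_lt (by omega) (by omega)
      omega
  rw [htail]
  refine congrArg₂ _ (by simp) (List.map_congr_left ?_)
  intro x _
  simp only [Function.comp]
  push_cast
  ring

-- shifting the start of a positive-step range
lemma pvShift (a b mI : Int) (hm : 0 < mI) :
    PySem.List.pyRange (a + mI) b mI = (PySem.List.pyRange a (b - mI) mI).map (· + mI) := by
  rw [PySem.List.pyRange_of_pos _ _ hm, PySem.List.pyRange_of_pos _ _ hm, List.map_map]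
  have hc : (if a + mI < b then ((b - (a + mI) + mI - 1) / mI).toNat else 0)
      = (if a < b - mI then ((b - mI - a + mI - 1) / mI).toNat else 0) := by
    by_cases h : a + mI < b
    · rw [if_pos h, if_pos (by omega)]; congr 1; ring_nf
    · rw [if_neg h, if_neg (by omega)]
  rw [hc]
  refine List.map_congr_left ?_
  intro x _
  simp only [Function.comp]
  ring

-- the first minimum of a non-increasing nonempty list is its last element
lemma pvMinLast (l : List Int) (hne : l ≠ [])
    (hs : l.Pairwise (fun a b : Int => b ≤ a)) :
    PySem.List.min? l (fun x => x) = some (l.getLast hne) := by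
  obtain ⟨v, hv⟩ : ∃ v, PySem.List.min? l (fun x => x) = some v := by
    cases hl : PySem.List.min? l (fun x => x) with
    | none => exact absurd (((PySem.List.min?_eq_none_iff _ _).mp hl)) hne
    | some v => exact ⟨v, rfl⟩
  rw [hv]
  have hmem := PySem.List.min?_mem hv
  have hmin := PySem.List.min?_isMin hv
  have hlast : l.getLast hne ∈ l := List.getLast_mem hne
  refine congrArg some (le_antisymm (hmin _ hlast) ?_)
  have : ∀ x ∈ l, l.getLast hne ≤ x := by
    intro x hx
    rw [List.getLast_eq_getElem]
    obtain ⟨j, hj, rfl⟩ := List.mem_iff_getElem.mp hx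
    rcases Nat.lt_or_ge j (l.length - 1) with h | h
    · exact List.pairwise_iff_getElem.mp hs j (l.length - 1) hj (by omega) h
    · have : j = l.length - 1 := by omega
      subst this; exact le_refl _
  exact this v hmem

-- pvStride vanishes when no position in the window is a counted one
lemma pvZero (m full : Int) : ∀ (l : List Int) (p : Int),
    (∀ j : Int, p ≤ j → j < p + (l.length : Int) → ¬ ((j + 1) % m = 0 ∧ j < full)) →
    pvStride m full p l = 0 := by
  intro l
  induction l with
  | nil => intro p _; rfl
  | cons x t ih =>
    intro p h
    simp only [pvStride]
    rw [if_neg (h p (le_refl _) (by simp only [List.length_cons]; push_cast; omega)),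
      ih (p + 1) (by
        intro j h1 h2
        refine h j (by omega) ?_
        simp only [List.length_cons] at *
        push_cast at h2 ⊢
        omega)]
    simp

-- pvStride splits over an append
lemma pvStrideAppend (m full : Int) : ∀ (l1 l2 : List Int) (p : Int),
    pvStride m full p (l1 ++ l2)
      = pvStride m full p l1 + pvStride m full (p + (l1.length : Int)) l2 := by
  intro l1
  induction l1 with
  | nil => intro l2 p; simp [pvStride]
  | cons x t ih =>
    intro l2 p
    simp only [List.cons_append, pvStride, ih]
    have : p + 1 + (t.length : Int) = p + ((x :: t).length : Int) := by simp; ring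
    rw [this, add_assoc]

-- shifting the start position by m lowers full by m
lemma pvStrideShift (m full : Int) : ∀ (l : List Int) (p : Int),
    pvStride m full (p + m) l = pvStride m (full - m) p l := by
  intro l
  induction l with
  | nil => intro p; rfl
  | cons x t ih =>
    intro p
    simp only [pvStride]
    have h1 : (p + m + 1) % m = (p + 1) % m := by
      rw [show p + m + 1 = p + 1 + m by ring, Int.add_emod_right]
    have h2 : ((p + 1) % m = 0 ∧ p + m < full) ↔ ((p + 1) % m = 0 ∧ p < full - m) := by
      constructor <;> rintro ⟨ha, hb⟩ <;> exact ⟨ha, by omega⟩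
    rw [h1, if_congr h2 rfl rfl, show p + m + 1 = p + 1 + m by ring, ih]

-- one step of the counting formula: how many counted positions lie in [p, p+1)
lemma pvStepCount (m full p : Int) (hm : 1 ≤ m) (hp : 0 ≤ p) :
    PySem.Int.floordiv (min (p + 1) full) m - PySem.Int.floordiv (min p full) m
      = if (p + 1) % m = 0 ∧ p < full then 1 else 0 := by
  rw [PySem.Int.floordiv_eq_ediv_of_pos (by omega), PySem.Int.floordiv_eq_ediv_of_pos (by omega)]
  by_cases hpf : p < full
  · have hmin1 : min (p + 1) full = p + 1 := by omega
    have hmin2 : min p full = p := by omega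
    rw [hmin1, hmin2]
    set q := p / m with hq
    set r := p % m with hr
    have hd : q * m + r = p := by rw [hq, hr]; rw [mul_comm]; exact Int.mul_ediv_add_emod p m
    have hr0 : 0 ≤ r := Int.emod_nonneg p (by omega)
    have hrm : r < m := Int.emod_lt_of_pos p (by omega)
    have hp1 : p + 1 = (r + 1) + m * q := by rw [mul_comm m q]; omega
    have he : (p + 1) / m = (r + 1) / m + q := by
      rw [hp1, Int.add_mul_ediv_left _ _ (by omega : m ≠ 0)]
    have hmod : (p + 1) % m = (r + 1) % m := by
      rw [hp1, Int.add_mul_emod_self_left]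
    by_cases hcase : r + 1 = m
    · have h1 : (r + 1) / m = 1 := by rw [hcase]; exact Int.ediv_self (by omega)
      have h2 : (r + 1) % m = 0 := by rw [hcase]; simp
      rw [he, h1, hmod, h2, if_pos ⟨rfl, hpf⟩]
      omega
    · have h1 : (r + 1) / m = 0 := Int.ediv_eq_zero_of_lt (by omega) (by omega)
      have h2 : (r + 1) % m = r + 1 := Int.emod_eq_of_lt (by omega) (by omega)
      rw [he, h1, hmod, h2, if_neg (by intro hc; omega)]
      omega
  · have hmin1 : min (p + 1) full = full := by omega
    have hmin2 : min p full = full := by omega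
    rw [hmin1, hmin2, if_neg (by intro hc; omega)]
    omega

-- peeling one run of c equal values off the front of pvStride
lemma pvRunStep (m full : Int) (hm : 1 ≤ m) :
    ∀ (c : Nat) (p : Int) (v : Int) (rest : List Int), 0 ≤ p →
    pvStride m full p (List.replicate c v ++ rest)
      = v * (PySem.Int.floordiv (min (p + (c : Int)) full) m - PySem.Int.floordiv (min p full) m)
        + pvStride m full (p + (c : Int)) rest := by
  intro c
  induction c with
  | zero => intro p v rest _; simp
  | succ c ih =>
    intro p v rest hp
    rw [List.replicate_succ, List.cons_append]
    simp only [pvStride]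
    rw [ih (p + 1) v rest (by omega)]
    have hstep := pvStepCount m full p hm hp
    have harr : p + 1 + (c : Int) = p + (((c : Nat) + 1 : Nat) : Int) := by push_cast; ring
    rw [harr]
    by_cases hc : (p + 1) % m = 0 ∧ p < full
    · rw [if_pos hc] at hstep ⊢
      have heq : PySem.Int.floordiv (min (p + 1) full) m
          = PySem.Int.floordiv (min p full) m + 1 := by omega
      rw [heq]
      ring
    · rw [if_neg hc] at hstep ⊢
      have heq : PySem.Int.floordiv (min (p + 1) full) m
          = PySem.Int.floordiv (min p full) m := by omega
      rw [heq]
      ring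

-- B's fold over runs equals pvStride over the flattened runs
lemma pvRunSum (m full : Int) (hm : 1 ≤ m) :
    ∀ (keys : List Int) (cnt : Int → Int), (∀ v ∈ keys, 0 ≤ cnt v) →
    ∀ (total start : Int), 0 ≤ start →
    (keys.foldl (fun (st : Int × Int) v =>
        (if min (st.2 + cnt v) full > st.2 then
           st.1 + v * (PySem.Int.floordiv (min (st.2 + cnt v) full) m - PySem.Int.floordiv st.2 m)
         else st.1,
         st.2 + cnt v)) (total, start)).1
      = total + pvStride m full start (keys.flatMap (fun v => List.replicate (cnt v).toNat v)) := by
  intro keys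
  induction keys with
  | nil => intro cnt _ total start _; simp [pvStride]
  | cons v ks ih =>
    intro cnt hcnt total start hstart
    have hc0 : 0 ≤ cnt v := hcnt v (List.mem_cons_self ..)
    rw [List.foldl_cons, List.flatMap_cons]
    show (ks.foldl _ (if min (start + cnt v) full > start then
           total + v * (PySem.Int.floordiv (min (start + cnt v) full) m - PySem.Int.floordiv start m)
         else total, start + cnt v)).1 = _
    rw [ih cnt (fun w hw => hcnt w (List.mem_cons_of_mem _ hw)) _ _ (by omega)]
    rw [pvRunStep m full hm (cnt v).toNat start v _ hstart, Int.toNat_of_nonneg hc0]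
    have hterm : (if min (start + cnt v) full > start then
           total + v * (PySem.Int.floordiv (min (start + cnt v) full) m - PySem.Int.floordiv start m)
         else total)
        = total + v * (PySem.Int.floordiv (min (start + cnt v) full) m
            - PySem.Int.floordiv (min start full) m) := by
      by_cases hg : min (start + cnt v) full > start
      · have hsf : start < full := lt_of_lt_of_le hg (min_le_right _ _)
        rw [if_pos hg, min_eq_left hsf.le]
      · rw [if_neg hg]
        have h1 : min (start + cnt v) full ≤ start := not_lt.mp hg
        rcases le_total start full with h | h
        · have heq : min (start + cnt v) full = start := le_antisymm h1 (le_min (by omega) h)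
          rw [heq, min_eq_left h]
          ring
        · have heq : min (start + cnt v) full = full := min_eq_right (by omega)
          rw [heq, min_eq_right h]
          ring
    rw [hterm]
    ring

-- the descending sort is the flattening of per-value runs over the sorted distinct values
lemma pvFlat (score : List Int) :
    (PySem.List.sorted (PySem.Set.ofList score) (fun x => x) true).flatMap
        (fun v => List.replicate (score.count v) v)
      = PySem.List.sorted score (fun x => x) true := by
  have hcount : ∀ (ks : List Int), ks.Nodup → ∀ a : Int,
      List.count a (ks.flatMap (fun v => List.replicate (score.count v) v))
        = if a ∈ ks then score.count a else 0 := by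
    intro ks
    induction ks with
    | nil => intro _ a; simp
    | cons w t ih =>
      intro hnd a
      rw [List.flatMap_cons, List.count_append, ih (List.nodup_cons.mp hnd).2 a,
        List.count_replicate]
      simp only [List.mem_cons, beq_iff_eq]
      by_cases haw : a = w
      · subst haw
        rw [if_pos rfl, if_pos (Or.inl rfl), if_neg (List.nodup_cons.mp hnd).1]
        omega
      · rw [if_neg (Ne.symm haw)]
        by_cases hat : a ∈ t
        · rw [if_pos hat, if_pos (Or.inr hat)]
          omega
        · rw [if_neg hat, if_neg (by rintro (h | h); exact haw h; exact hat h)]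
  set keys := PySem.List.sorted (PySem.Set.ofList score) (fun x => x) true with hk
  have hnd : keys.Nodup :=
    (PySem.List.sorted_perm _ _ _).nodup_iff.mpr (PySem.Set.nodup_ofList score)
  have hmem : ∀ a : Int, a ∈ keys ↔ a ∈ score := by
    intro a
    rw [hk, PySem.List.mem_sorted, PySem.Set.mem_ofList]
  have hperm : (keys.flatMap (fun v => List.replicate (score.count v) v)).Perm score := by
    rw [List.perm_iff_count]
    intro a
    rw [hcount keys hnd a]
    by_cases ha : a ∈ score
    · rw [if_pos ((hmem a).mpr ha)]
    · rw [if_neg (fun h => ha ((hmem a).mp h)), List.count_eq_zero_of_not_mem ha]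
  have hgt : keys.Pairwise (fun a b : Int => b < a) := by
    have h1 := PySem.List.sorted_pairwise_rev (PySem.Set.ofList score) (fun x : Int => x)
    rw [← hk] at h1
    exact (h1.and hnd).imp (fun h => lt_of_le_of_ne h.1 (Ne.symm h.2))
  have hpair : (keys.flatMap (fun v => List.replicate (score.count v) v)).Pairwise
      (fun a b : Int => b ≤ a) := by
    rw [List.flatMap_def, List.pairwise_flatten]
    constructor
    · intro l hl
      obtain ⟨v, hv, rfl⟩ := List.mem_map.mp hl
      exact List.pairwise_replicate.mpr (Or.inr (le_refl v))
    · rw [List.pairwise_map]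
      refine hgt.imp ?_
      intro a b hab x hx y hy
      rw [List.eq_of_mem_replicate hx, List.eq_of_mem_replicate hy]
      exact hab.le
  refine PySem.List.eq_of_perm_of_pairwise_le_of_injective (fun x : Int => -x)
    neg_injective (hperm.trans (PySem.List.sorted_perm score (fun x => x) true).symm)
    (hpair.imp (fun h => neg_le_neg h))
    ((PySem.List.sorted_pairwise_rev score (fun x : Int => x)).imp (fun h => neg_le_neg h))

-- A's box fold equals m times pvStride over the sorted list
lemma pvA (m : Int) (hm : 1 ≤ m) : ∀ (N : Nat) (s : List Int), s.length ≤ N →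
    s.Pairwise (fun a b : Int => b ≤ a) →
    ((PySem.List.pyRange 0 (s.length : Int) m).map
      (fun i => if ((PySem.List.slice s (some i) (some (i + m))).length : Int) = m then
          ((PySem.List.min? (PySem.List.slice s (some i) (some (i + m))) (fun x => x)).getD 0)
            * ((PySem.List.slice s (some i) (some (i + m))).length : Int)
        else 0)).sum
    = m * pvStride m ((s.length : Int) - (s.length : Int) % m) 0 s := by
  intro N
  induction N with
  | zero =>
    intro s hlen _
    have hs0 : s = [] := List.eq_nil_of_length_eq_zero (by omega)
    subst hs0
    rw [pvNil _ _ _ (by omega) (by simp)]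
    simp [pvStride]
  | succ N ih =>
    intro s hlen hs
    set n : Int := (s.length : Int) with hn
    by_cases hbig : m ≤ n
    · set M : Nat := m.toNat with hM
      have hMm : (M : Int) = m := by omega
      have hM1 : 1 ≤ M := by omega
      have hMn : M ≤ s.length := by omega
      -- A side: peel the first (full) box off the range
      rw [pvCons 0 n m (by omega) (by omega)]
      have hsh : PySem.List.pyRange (0 + m) n m
          = (PySem.List.pyRange 0 (n - m) m).map (· + m) := pvShift 0 n m (by omega)
      rw [hsh, List.map_cons, List.map_map, List.sum_cons]
      have hAtail : ∀ i ∈ PySem.List.pyRange 0 (n - m) m,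
          PySem.List.slice s (some (i + m)) (some (i + m + m))
          = PySem.List.slice (s.drop M) (some i) (some (i + m)) := by
        intro i hi
        have hi0 : 0 ≤ i := ((PySem.List.mem_pyRange_iff_of_pos (by omega) i).mp hi).1
        rw [PySem.List.slice_toNat _ (by omega) (by omega),
          PySem.List.slice_toNat _ (by omega) (by omega), List.drop_drop]
        congr 1
        · omega
        · congr 1; omega
      have hbox0 : PySem.List.slice s (some 0) (some (0 + m)) = s.take M := by
        rw [PySem.List.slice_toNat _ (by omega) (by omega),
          show Int.toNat 0 = 0 from rfl, List.drop_zero]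
        congr 1
        omega
      have htlen : ((s.take M).length : Int) = m := by
        rw [List.length_take]; omega
      have htne : s.take M ≠ [] :=
        List.ne_nil_of_length_pos (by rw [List.length_take]; omega)
      have hmin0 : PySem.List.min? (s.take M) (fun x => x)
          = some ((s.take M).getLast htne) :=
        pvMinLast _ htne (hs.sublist (List.take_sublist _ _))
      have hlast0 : (s.take M).getLast htne = s[M - 1]'(by omega) := by
        rw [List.getLast_eq_getElem]
        have : (s.take M).length - 1 = M - 1 := by simp [List.length_take]; omega
        simp only [this]
        exact List.getElem_take
      -- full ≥ m when a full box exists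
      set full : Int := n - n % m with hfull
      have hfm : m ≤ full := by
        have h1 : n % m = n - m * (n / m) := by rw [Int.emod_def]
        have h2 : (1 : Int) ≤ n / m := by
          rw [Int.le_ediv_iff_mul_le (by omega)]
          omega
        have h3 : m * 1 ≤ m * (n / m) := mul_le_mul_of_nonneg_left h2 (by omega)
        omega
      have hdlen : ((s.drop M).length : Int) = n - m := by
        simp [List.length_drop]
        omega
      -- RHS: split pvStride at the first box
      have hRHS : pvStride m full 0 s
          = s[M - 1]'(by omega) + pvStride m (full - m) 0 (s.drop M) := by
        conv_lhs => rw [← List.take_append_drop M s]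
        rw [pvStrideAppend, htlen]
        have hfront : pvStride m full 0 (s.take M) = s[M - 1]'(by omega) := by
          have htk : s.take M = s.take (M - 1) ++ [s[M - 1]'(by omega)] := by
            conv_lhs => rw [show M = (M - 1) + 1 by omega]
            rw [List.take_add_one, List.getElem?_eq_getElem (by omega)]
            rfl
          rw [htk, pvStrideAppend]
          have hlen' : ((s.take (M - 1)).length : Int) = m - 1 := by
            rw [List.length_take]
            push_cast
            omega
          have h0 : pvStride m full 0 (s.take (M - 1)) = 0 := by
            apply pvZero
            intro j hj0 hjlt
            rw [hlen'] at hjlt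
            rintro ⟨hdvd, -⟩
            have : (j + 1) % m = j + 1 := Int.emod_eq_of_lt (by omega) (by omega)
            omega
          rw [h0, hlen']
          simp only [pvStride]
          rw [show (0 : Int) + (m - 1) + 1 = m by ring, Int.emod_self]
          rw [if_pos ⟨rfl, by omega⟩]
          simp
        rw [hfront, pvStrideShift m full (s.drop M) 0]
      -- induction hypothesis on the remainder
      have hIH := ih (s.drop M) (by rw [List.length_drop]; omega) hs.drop
      have hfd : ((s.drop M).length : Int) - ((s.drop M).length : Int) % m = full - m := by
        rw [hdlen, hfull]
        have := Int.sub_emod_right n m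
        omega
      rw [hfd, hdlen] at hIH
      -- assemble
      calc (if ((PySem.List.slice s (some 0) (some (0 + m))).length : Int) = m then
              ((PySem.List.min? (PySem.List.slice s (some 0) (some (0 + m))) (fun x => x)).getD 0)
                * ((PySem.List.slice s (some 0) (some (0 + m))).length : Int)
            else 0)
            + (((PySem.List.pyRange 0 (n - m) m).map
                (fun i => (fun j => if ((PySem.List.slice s (some j) (some (j + m))).length : Int) = m then
                    ((PySem.List.min? (PySem.List.slice s (some j) (some (j + m))) (fun x => x)).getD 0)
                      * ((PySem.List.slice s (some j) (some (j + m))).length : Int)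
                  else 0) (i + m))).sum)
          = s[M - 1]'(by omega) * m
            + (((PySem.List.pyRange 0 (n - m) m).map
                (fun i => if ((PySem.List.slice (s.drop M) (some i) (some (i + m))).length : Int) = m then
                    ((PySem.List.min? (PySem.List.slice (s.drop M) (some i) (some (i + m))) (fun x => x)).getD 0)
                      * ((PySem.List.slice (s.drop M) (some i) (some (i + m))).length : Int)
                  else 0)).sum) := by
            congr 1
            · rw [hbox0, if_pos htlen, hmin0, hlast0, htlen]
              simp
            · refine congrArg List.sum (List.map_congr_left ?_)
              intro i hi
              simp only
              rw [hAtail i hi]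
        _ = s[M - 1]'(by omega) * m + m * pvStride m (full - m) 0 (s.drop M) := by rw [hIH]
        _ = m * pvStride m full 0 s := by rw [hRHS]; ring
    · -- no full box: both sides vanish
      rw [not_le] at hbig
      have hfull0 : n - n % m = 0 := by
        have : n % m = n := Int.emod_eq_of_lt (by omega) (by omega)
        omega
      rw [hfull0]
      have hstride0 : pvStride m 0 0 s = 0 := by
        apply pvZero
        intro j hj0 _
        rintro ⟨-, hlt⟩
        omega
      rw [hstride0, mul_zero]
      by_cases hz : n ≤ 0
      · rw [pvNil _ _ _ (by omega) (by omega)]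
        simp
      · rw [pvCons 0 n m (by omega) (by omega),
          pvNil (0 + m) n m (by omega) (by omega)]
        have hslen : ((PySem.List.slice s (some 0) (some (0 + m))).length : Int) = n := by
          rw [PySem.List.slice_toNat _ (by omega) (by omega)]
          simp [List.length_take]
          omega
        simp only [List.map_cons, List.map_nil, List.sum_cons, List.sum_nil]
        rw [if_neg (by omega)]
        simp

-- ===== VERDICT (by name: the statement is the Claim_ definition above) =====
theorem solution_spec : Claim_equal_solution := by
  intro k m score _ hpre
  unfold Spec_solution solution solution_alt
  simp only []
  set s : List Int := PySem.List.sorted score (fun x => x) true with hsdef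
  by_cases hm1 : m < 1
  · -- m ≤ -1 (m = 0 is excluded by Pre_): A's range is empty, B returns 0
    rw [if_pos hm1, pvNegNil 0 (s.length : Int) m (by unfold Pre_solution at hpre; omega) (by positivity)]
    simp
  · rw [if_neg hm1]
    have hm : 1 ≤ m := by omega
    -- A's fold over boxes is a sum over boxes
    have hA : ∀ init : Int, ∀ l : List (List Int),
        l.foldl (fun price b =>
          if (b.length : Int) = m then
            price + ((PySem.List.min? b (fun x => x)).getD 0) * (b.length : Int)
          else price) init
        = init + (l.map (fun b =>
            if (b.length : Int) = m then
              ((PySem.List.min? b (fun x => x)).getD 0) * (b.length : Int)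
            else 0)).sum := by
      intro init l
      rw [show (fun (price : Int) (b : List Int) =>
            if (b.length : Int) = m then
              price + ((PySem.List.min? b (fun x => x)).getD 0) * (b.length : Int)
            else price)
          = (fun (price : Int) (b : List Int) => price +
              (if (b.length : Int) = m then
                ((PySem.List.min? b (fun x => x)).getD 0) * (b.length : Int)
              else 0)) by
        funext p b; split_ifs <;> simp]
      exact PySem.List.foldl_add _ _ _
    rw [hA, List.map_map]
    simp only [Function.comp_def, zero_add]
    -- the counter's keys are the distinct scores, its counts the multiplicities
    simp only [PySem.Dict.getD_foldl_insert_add_one, PySem.Dict.getD_empty,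
      PySem.Dict.keys_foldl_insert, PySem.Dict.keys_empty, zero_add]
    rw [show PySem.Set.update ([] : List Int) score = PySem.Set.ofList score from rfl]
    have hmod : PySem.Int.mod (score.length : Int) m = (score.length : Int) % m :=
      PySem.Int.mod_eq_emod_of_pos (by omega)
    rw [hmod]
    rw [pvRunSum m ((score.length : Int) - (score.length : Int) % m) hm
      (PySem.List.sorted (PySem.Set.ofList score) (fun x => x) true)
      (fun v => (score.count v : Int)) (fun v _ => Int.natCast_nonneg _) 0 0 (le_refl 0)]
    have htoNat : (fun v : Int => List.replicate ((score.count v : Int)).toNat v)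
        = fun v : Int => List.replicate (score.count v) v := by
      funext v
      rw [Int.toNat_natCast]
    rw [htoNat, pvFlat score, ← hsdef, zero_add]
    have hslen : (score.length : Int) = (s.length : Int) := by
      rw [hsdef, PySem.List.length_sorted]
    rw [hslen]
    exact pvA m hm s.length s (le_refl _) (PySem.List.sorted_pairwise_rev score (fun x => x))
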